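-- pv_equiv track=rewrite | github.com/GalGoldstein/box_office_revenue_prediction | preprocess_data.py | _get_first_crew_member_per_job
-- ===== SOURCE A (Python) =====
-- def _get_first_crew_member_per_job(crew_list: list, jobs: list):
--     """
--     return a dict with crew members names (that appear first) for every job in `jobs`
--     :param crew_list: (list) a list of crew members data
--     :param jobs: (list) a list of wanted jobs
--     :return: dict with crew members names for every job in `jobs`
--     """
--     result = dict.fromkeys(jobs, '<no crew>')
--     for job in jobs:
--         for member_dict in crew_list:
--             if member_dict.get('job') == job:
--                 result[job] = member_dict.get('name', '<no crew>')
--                 break  # to get the first only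
--     return result
-- ===== SOURCE B (Python) =====
-- def _get_first_crew_member_per_job(crew_list: list, jobs: list):
--     # Index-first: one pass over crew_list recording the first name per job,
--     # then one lookup per wanted job (instead of rescanning crew_list for every job).
--     first_by_job = {}
--     for member in crew_list:
--         j = member.get('job')
--         if j is not None and j not in first_by_job:
--             first_by_job[j] = member.get('name', '<no crew>')
--     return {job: first_by_job.get(job, '<no crew>') for job in jobs}
-- ===== Notes on version B (the rewrite author's own statement) =====
-- stated objective: faster
-- what changed: Replaces the nested 'for each job, rescan crew_list until the first match' with a single pass that builds a first-name-per-job index dict, followed by one O(1) lookup per job.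
import Mathlib
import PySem

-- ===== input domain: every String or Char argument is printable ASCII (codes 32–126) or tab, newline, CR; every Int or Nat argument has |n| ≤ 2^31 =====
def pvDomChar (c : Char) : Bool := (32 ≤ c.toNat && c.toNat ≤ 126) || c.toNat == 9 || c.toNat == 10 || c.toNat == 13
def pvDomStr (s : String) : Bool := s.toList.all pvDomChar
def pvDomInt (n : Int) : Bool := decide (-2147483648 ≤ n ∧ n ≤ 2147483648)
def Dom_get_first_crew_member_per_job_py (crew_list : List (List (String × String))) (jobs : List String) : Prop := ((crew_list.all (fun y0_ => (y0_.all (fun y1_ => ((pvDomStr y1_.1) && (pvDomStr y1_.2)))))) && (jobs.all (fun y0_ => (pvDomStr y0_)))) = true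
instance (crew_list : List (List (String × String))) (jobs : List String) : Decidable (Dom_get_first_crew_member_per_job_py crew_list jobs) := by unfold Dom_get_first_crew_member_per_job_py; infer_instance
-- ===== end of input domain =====

-- B builds a first-name-per-job index in ONE pass over crew_list, then one lookup per job
-- (A rescans crew_list for every job); return-value equivalence is proved below.

-- member_dict.get(k) on an input dict given as an association list (first match).
def pyAget (m : List (String × String)) (k : String) : Option String :=
  (m.find? (fun p => p.1 == k)).map (·.2)

-- member_dict.get(k, dflt)
def pyAgetD (m : List (String × String)) (k : String) (dflt : String) : String :=
  ((m.find? (fun p => p.1 == k)).map (·.2)).getD dflt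

-- ===== PORT A =====
-- the inner 'for member_dict in crew_list: … break' loop of A: first member whose 'job' equals job
def pvFindA (crew_list : List (List (String × String))) (job : String) :
    Option (List (String × String)) :=
  match crew_list with
  | [] => none
  | m :: rest => if pyAget m "job" == some job then some m else pvFindA rest job

def get_first_crew_member_per_job_py (crew_list : List (List (String × String))) (jobs : List String) : List (String × String) :=
  -- result = dict.fromkeys(jobs, '<no crew>')
  let init : PySem.Dict String String :=
    jobs.foldl (fun d j => d.insert j "<no crew>") PySem.Dict.empty
  -- for job in jobs: inner scan with break, then result[job] = member.get('name', '<no crew>')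
  let final : PySem.Dict String String :=
    jobs.foldl (fun d job =>
      match pvFindA crew_list job with
      | some m => d.insert job (pyAgetD m "name" "<no crew>")
      | none => d) init
  final.items

-- ===== PORT B =====
def get_first_crew_member_per_job_py_alt (crew_list : List (List (String × String))) (jobs : List String) : List (String × String) :=
  -- one pass: first_by_job[j] set only when j is a real job not seen before
  let first_by_job : PySem.Dict String String :=
    crew_list.foldl (fun d m =>
      match pyAget m "job" with
      | none => d
      | some j => if d.contains j then d else d.insert j (pyAgetD m "name" "<no crew>")) PySem.Dict.empty
  -- {job: first_by_job.get(job, '<no crew>') for job in jobs}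
  let result : PySem.Dict String String :=
    jobs.foldl (fun d job => d.insert job (first_by_job.getD job "<no crew>")) PySem.Dict.empty
  result.items

-- ===== PRECONDITION & SPEC =====
def Spec_get_first_crew_member_per_job_py (crew_list : List (List (String × String))) (jobs : List String) (out : List (String × String)) : Prop := out = get_first_crew_member_per_job_py_alt crew_list jobs
instance (crew_list : List (List (String × String))) (jobs : List String) (out : List (String × String)) : Decidable (Spec_get_first_crew_member_per_job_py crew_list jobs out) := by unfold Spec_get_first_crew_member_per_job_py; infer_instance

-- ===== CLAIM (what is proved, stated in full; the proofs are below) =====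
def Claim_equal_get_first_crew_member_per_job_py : Prop := ∀ (crew_list : List (List (String × String))) (jobs : List String), Dom_get_first_crew_member_per_job_py crew_list jobs → Spec_get_first_crew_member_per_job_py crew_list jobs (get_first_crew_member_per_job_py crew_list jobs)

-- ===== LEMMAS AND PROOFS =====

-- the value both programs ultimately associate with a job
def pvName (crew_list : List (List (String × String))) (j : String) : String :=
  match pvFindA crew_list j with
  | some m => pyAgetD m "name" "<no crew>"
  | none => "<no crew>"

-- B's index pass computes the first name per job
theorem pv_fbj_get? (crew_list : List (List (String × String)))
    (d : PySem.Dict String String) (j : String) :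
    (crew_list.foldl (fun d m =>
      match pyAget m "job" with
      | none => d
      | some k => if d.contains k then d else d.insert k (pyAgetD m "name" "<no crew>")) d).get? j
    = if (d.get? j).isSome then d.get? j
      else (pvFindA crew_list j).map (fun m => pyAgetD m "name" "<no crew>") := by
  induction crew_list generalizing d with
  | nil => cases h : d.get? j <;> simp [pvFindA, h]
  | cons m rest ih =>
    simp only [List.foldl_cons]
    cases hk : pyAget m "job" with
    | none => rw [ih]; simp [pvFindA, hk]
    | some k =>
      simp only []
      by_cases hjk : j = k
      · subst hjk
        by_cases hc : d.contains j = true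
        · have hs : (d.get? j).isSome = true := by
            rw [PySem.Dict.contains_eq_isSome_get?] at hc; exact hc
          rw [if_pos hc, ih, if_pos hs, if_pos hs]
        · have hns : (d.get? j).isSome = false := by
            rw [PySem.Dict.contains_eq_isSome_get?] at hc; simpa using hc
          rw [if_neg hc, ih]
          rw [PySem.Dict.get?_insert_self d j (pyAgetD m "name" "<no crew>")]
          simp [pvFindA, hk, hns]
      · have hbeq : (pyAget m "job" == some j) = false := by
          simp [hk]; exact fun h => hjk h.symm
        by_cases hc : d.contains k = true
        · rw [if_pos hc, ih]
          simp [pvFindA, hbeq]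
        · rw [if_neg hc, ih, PySem.Dict.get?_insert_of_ne d (pyAgetD m "name" "<no crew>") hjk]
          simp [pvFindA, hbeq]

-- B's output pass: lookup of the final dict
theorem pv_b_get? (g : String → String) (jl : List String)
    (d : PySem.Dict String String) (j : String) :
    (jl.foldl (fun d job => d.insert job (g job)) d).get? j
    = if j ∈ jl then some (g j) else d.get? j := by
  induction jl generalizing d with
  | nil => simp
  | cons j0 rest ih =>
    simp only [List.foldl_cons, ih, List.mem_cons]
    by_cases hm : j ∈ rest
    · simp [hm]
    · by_cases hj : j = j0
      · subst hj; simp [hm, PySem.Dict.get?_insert_self]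
      · simp [hm, hj, PySem.Dict.get?_insert_of_ne d (g j0) hj]

-- fromkeys: every key holds the default
theorem pv_fromkeys_getD (jl : List String) (d : PySem.Dict String String) (j : String)
    (h : d.getD j "<no crew>" = "<no crew>") :
    (jl.foldl (fun d j => d.insert j "<no crew>") d).getD j "<no crew>" = "<no crew>" := by
  induction jl generalizing d with
  | nil => simpa using h
  | cons j0 rest ih =>
    simp only [List.foldl_cons]
    apply ih
    by_cases hj : j = j0
    · subst hj; simp [PySem.Dict.getD_insert_self]
    · rwa [PySem.Dict.getD_insert_of_ne d "<no crew>" "<no crew>" hj]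

-- A's outer loop: value at j after processing jl
theorem pv_a_getD (crew_list : List (List (String × String))) (jl : List String)
    (d : PySem.Dict String String) (j : String) :
    (jl.foldl (fun d job =>
      match pvFindA crew_list job with
      | some m => d.insert job (pyAgetD m "name" "<no crew>")
      | none => d) d).getD j "<no crew>"
    = if j ∈ jl ∧ (pvFindA crew_list j).isSome then pvName crew_list j
      else d.getD j "<no crew>" := by
  induction jl generalizing d with
  | nil => simp
  | cons j0 rest ih =>
    simp only [List.foldl_cons]
    cases hf : pvFindA crew_list j0 with
    | none =>
      rw [ih]
      by_cases hj : j = j0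
      · subst hj; simp [hf]
      · simp [hj, List.mem_cons]
    | some m =>
      simp only []
      rw [ih]
      by_cases hj : j = j0
      · subst hj
        by_cases hm : j ∈ rest
        · simp [hm, hf, pvName]
        · simp [hm, hf, pvName, PySem.Dict.getD_insert_self]
      · rw [PySem.Dict.getD_insert_of_ne d (pyAgetD m "name" "<no crew>") "<no crew>" hj]
        simp [List.mem_cons, hj]

-- A's outer loop never changes the key list when every processed job is already a key
theorem pv_a_keys (crew_list : List (List (String × String))) (jl : List String)
    (d : PySem.Dict String String) (h : ∀ x ∈ jl, d.contains x) :
    (jl.foldl (fun d job =>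
      match pvFindA crew_list job with
      | some m => d.insert job (pyAgetD m "name" "<no crew>")
      | none => d) d).keys = d.keys := by
  induction jl generalizing d with
  | nil => rfl
  | cons j0 rest ih =>
    simp only [List.foldl_cons]
    cases hf : pvFindA crew_list j0 with
    | none => exact ih d (fun x hx => h x (List.mem_cons_of_mem _ hx))
    | some m =>
      have hc : d.contains j0 := h j0 (List.mem_cons_self ..)
      simp only []
      rw [ih, PySem.Dict.keys_insert_of_contains d (pyAgetD m "name" "<no crew>") hc]
      intro x hx
      rw [PySem.Dict.contains_insert]
      simp [h x (List.mem_cons_of_mem _ hx)]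

-- ===== VERDICT (by name: the statement is the Claim_ definition above) =====
theorem get_first_crew_member_per_job_py_spec : Claim_equal_get_first_crew_member_per_job_py := by
  intro crew_list jobs _
  unfold Spec_get_first_crew_member_per_job_py
  unfold get_first_crew_member_per_job_py get_first_crew_member_per_job_py_alt
  simp only []
  set dA := jobs.foldl (fun d job =>
      match pvFindA crew_list job with
      | some m => d.insert job (pyAgetD m "name" "<no crew>")
      | none => d)
    (jobs.foldl (fun d j => d.insert j "<no crew>") PySem.Dict.empty) with hdA
  set fbj := crew_list.foldl (fun d m =>
      match pyAget m "job" with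
      | none => d
      | some j => if d.contains j then d else d.insert j (pyAgetD m "name" "<no crew>")) PySem.Dict.empty with hfbj
  set dB := jobs.foldl (fun d job => d.insert job (fbj.getD job "<no crew>")) PySem.Dict.empty with hdB
  have hkeysInit : (jobs.foldl (fun d j => d.insert j "<no crew>") PySem.Dict.empty).keys
      = PySem.Set.ofList jobs := by
    rw [PySem.Dict.keys_foldl_insert jobs (fun _ _ => "<no crew>") PySem.Dict.empty]
    simp [PySem.Set.update_nil_left, PySem.Dict.keys_empty]
  have hcontInit : ∀ x ∈ jobs, (jobs.foldl (fun d j => d.insert j "<no crew>") PySem.Dict.empty).contains x := by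
    intro x hx
    rw [PySem.Dict.contains_iff_mem_keys, hkeysInit]
    exact (PySem.Set.mem_ofList jobs x).mpr hx
  have hkA : dA.keys = PySem.Set.ofList jobs := by
    rw [hdA, pv_a_keys crew_list jobs _ hcontInit, hkeysInit]
  have hkB : dB.keys = PySem.Set.ofList jobs := by
    rw [hdB, PySem.Dict.keys_foldl_insert jobs (fun _ x => fbj.getD x "<no crew>") PySem.Dict.empty]
    simp [PySem.Set.update_nil_left, PySem.Dict.keys_empty]
  have hnA : dA.keys.Nodup := by rw [hkA]; exact PySem.Set.nodup_ofList jobs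
  have hnB : dB.keys.Nodup := by rw [hkB]; exact PySem.Set.nodup_ofList jobs
  have hval : ∀ j ∈ jobs, dA.getD j "<no crew>" = dB.getD j "<no crew>" := by
    intro j hj
    have hA : dA.getD j "<no crew>"
        = if j ∈ jobs ∧ (pvFindA crew_list j).isSome then pvName crew_list j else "<no crew>" := by
      rw [hdA, pv_a_getD crew_list jobs _ j,
          pv_fromkeys_getD jobs PySem.Dict.empty j (by simp)]
    have hfb : fbj.getD j "<no crew>" = pvName crew_list j := by
      rw [PySem.Dict.getD_eq_get?_getD, hfbj, pv_fbj_get? crew_list PySem.Dict.empty j]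
      cases hf : pvFindA crew_list j <;> simp [pvName, hf]
    have hB : dB.getD j "<no crew>" = pvName crew_list j := by
      rw [PySem.Dict.getD_eq_get?_getD, hdB, pv_b_get? (fun job => fbj.getD job "<no crew>") jobs _ j]
      simp [hj, hfb]
    rw [hA, hB]
    by_cases hs : (pvFindA crew_list j).isSome
    · simp [hj, hs]
    · cases hf : pvFindA crew_list j
      · simp [hj, hf, pvName]
      · simp [hf] at hs
  rw [PySem.Dict.items_eq_map_keys dA hnA "<no crew>",
      PySem.Dict.items_eq_map_keys dB hnB "<no crew>", hkA, hkB]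
  apply List.map_congr_left
  intro j hj
  have hjm : j ∈ jobs := (PySem.Set.mem_ofList jobs j).mp hj
  simp [hval j hjm]
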